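-- pv_equiv track=rewrite | github.com/DIAscendion/TableauPOC | tableau_comparator.py | visual_summary_line
-- ===== SOURCE A (Python) =====
-- def visual_summary_line(bullets):
--     counts = {
--         "filter": 0,
--         "calculation": 0,
--         "worksheet": 0,
--         "datasource": 0,
--     }
--     for b in bullets:
--         bl = b.lower()
--         if "filter" in bl:
--             counts["filter"] += 1
--         if "calculation" in bl or "lod" in bl:
--             counts["calculation"] += 1
--         if "worksheet" in bl:
--             counts["worksheet"] += 1
--         if "datasource" in bl:
--             counts["datasource"] += 1
--
--     parts = []
--     if counts["filter"]:
--         parts.append(f"{counts['filter']} filter changes")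
--     if counts["calculation"]:
--         parts.append(f"{counts['calculation']} calculation changes")
--     if counts["worksheet"]:
--         parts.append(f"{counts['worksheet']} worksheet changes")
--     if counts["datasource"]:
--         parts.append(f"{counts['datasource']} datasource changes")
--
--     return ", ".join(parts) or "Configuration updated"
-- ===== SOURCE B (Python) =====
-- def visual_summary_line(bullets):
--     lows = [b.lower() for b in bullets]
--     pairs = [
--         (sum("filter" in bl for bl in lows), "filter"),
--         (sum("calculation" in bl or "lod" in bl for bl in lows), "calculation"),
--         (sum("worksheet" in bl for bl in lows), "worksheet"),
--         (sum("datasource" in bl for bl in lows), "datasource"),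
--     ]
--     parts = [f"{c} {name} changes" for c, name in pairs if c]
--     return ", ".join(parts) if parts else "Configuration updated"
-- ===== Notes on version B (the rewrite author's own statement) =====
-- stated objective: simpler
-- what changed: Replaces the shared single-pass loop over a counts dict by four independent per-category scans (sum of membership tests over pre-lowered bullets) and builds the summary by filtering a fixed (count, name) table instead of an if-chain of appends.
import Mathlib
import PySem

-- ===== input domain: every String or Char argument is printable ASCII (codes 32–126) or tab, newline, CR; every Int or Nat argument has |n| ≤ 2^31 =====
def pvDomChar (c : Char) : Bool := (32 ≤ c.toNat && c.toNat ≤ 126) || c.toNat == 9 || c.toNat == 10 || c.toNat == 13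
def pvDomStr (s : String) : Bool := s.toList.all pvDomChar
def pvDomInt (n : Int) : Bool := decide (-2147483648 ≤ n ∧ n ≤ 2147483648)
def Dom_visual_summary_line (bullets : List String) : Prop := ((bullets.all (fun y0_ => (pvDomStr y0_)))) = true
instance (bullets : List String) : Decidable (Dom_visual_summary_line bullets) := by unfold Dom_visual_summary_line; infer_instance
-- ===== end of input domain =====

-- B replaces A's single-pass counts-dict loop by four independent per-category scans and a filtered fixed table; objective: simpler.

-- ===== PORT A =====
def pvStepA (d : PySem.Dict String Int) (b : String) : PySem.Dict String Int :=
  let bl := PySem.Str.lower b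
  let d := if PySem.Str.isIn "filter" bl then d.insert "filter" (d.getD "filter" 0 + 1) else d
  let d := if PySem.Str.isIn "calculation" bl || PySem.Str.isIn "lod" bl then
             d.insert "calculation" (d.getD "calculation" 0 + 1) else d
  let d := if PySem.Str.isIn "worksheet" bl then d.insert "worksheet" (d.getD "worksheet" 0 + 1) else d
  let d := if PySem.Str.isIn "datasource" bl then d.insert "datasource" (d.getD "datasource" 0 + 1) else d
  d

def visual_summary_line (bullets : List String) : String :=
  let counts : PySem.Dict String Int :=
    PySem.Dict.ofList [("filter", 0), ("calculation", 0), ("worksheet", 0), ("datasource", 0)]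
  let counts := bullets.foldl pvStepA counts
  let parts : List String := []
  let parts := if counts.getD "filter" 0 ≠ 0 then
                 parts ++ [PySem.Int.toStr (counts.getD "filter" 0) ++ " filter changes"] else parts
  let parts := if counts.getD "calculation" 0 ≠ 0 then
                 parts ++ [PySem.Int.toStr (counts.getD "calculation" 0) ++ " calculation changes"] else parts
  let parts := if counts.getD "worksheet" 0 ≠ 0 then
                 parts ++ [PySem.Int.toStr (counts.getD "worksheet" 0) ++ " worksheet changes"] else parts
  let parts := if counts.getD "datasource" 0 ≠ 0 then
                 parts ++ [PySem.Int.toStr (counts.getD "datasource" 0) ++ " datasource changes"] else parts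
  let j := PySem.Str.join ", " parts
  if j = "" then "Configuration updated" else j

-- ===== PORT B =====
def visual_summary_line_alt (bullets : List String) : String :=
  let lows := bullets.map (fun b => PySem.Str.lower b)
  let pairs : List (Int × String) :=
    [ ((lows.countP (fun bl => PySem.Str.isIn "filter" bl) : Int), "filter"),
      ((lows.countP (fun bl => PySem.Str.isIn "calculation" bl || PySem.Str.isIn "lod" bl) : Int), "calculation"),
      ((lows.countP (fun bl => PySem.Str.isIn "worksheet" bl) : Int), "worksheet"),
      ((lows.countP (fun bl => PySem.Str.isIn "datasource" bl) : Int), "datasource") ]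
  let parts := (pairs.filter (fun p => p.1 ≠ 0)).map
      (fun p => PySem.Int.toStr p.1 ++ " " ++ p.2 ++ " changes")
  if parts = [] then "Configuration updated" else PySem.Str.join ", " parts

-- ===== PRECONDITION & SPEC =====
def Spec_visual_summary_line (bullets : List String) (out : String) : Prop := out = visual_summary_line_alt bullets
instance (bullets : List String) (out : String) : Decidable (Spec_visual_summary_line bullets out) := by unfold Spec_visual_summary_line; infer_instance

-- ===== CLAIM (what is proved, stated in full; the proofs are below) =====
def Claim_equal_visual_summary_line : Prop := ∀ (bullets : List String), Dom_visual_summary_line bullets → Spec_visual_summary_line bullets (visual_summary_line bullets)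

-- ===== LEMMAS AND PROOFS =====
theorem getD_stepA (d : PySem.Dict String Int) (b : String) (k : String)
    (hk : k = "filter" ∨ k = "calculation" ∨ k = "worksheet" ∨ k = "datasource") :
    (pvStepA d b).getD k 0 = d.getD k 0 +
      (if k = "filter" then (if PySem.Str.isIn "filter" (PySem.Str.lower b) then 1 else 0)
       else if k = "calculation" then (if PySem.Str.isIn "calculation" (PySem.Str.lower b) || PySem.Str.isIn "lod" (PySem.Str.lower b) then 1 else 0)
       else if k = "worksheet" then (if PySem.Str.isIn "worksheet" (PySem.Str.lower b) then 1 else 0)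
       else (if PySem.Str.isIn "datasource" (PySem.Str.lower b) then 1 else 0)) := by
  rcases hk with h | h | h | h <;> subst h <;>
    simp only [pvStepA] <;> split_ifs <;>
    simp_all [PySem.Dict.getD_insert]

theorem foldA_getD (bullets : List String) (d : PySem.Dict String Int) (k : String) (p : String → Bool)
    (hk : k = "filter" ∨ k = "calculation" ∨ k = "worksheet" ∨ k = "datasource")
    (hp : ∀ b, p b = (if k = "filter" then PySem.Str.isIn "filter" (PySem.Str.lower b)
       else if k = "calculation" then PySem.Str.isIn "calculation" (PySem.Str.lower b) || PySem.Str.isIn "lod" (PySem.Str.lower b)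
       else if k = "worksheet" then PySem.Str.isIn "worksheet" (PySem.Str.lower b)
       else PySem.Str.isIn "datasource" (PySem.Str.lower b))) :
    (bullets.foldl pvStepA d).getD k 0 = d.getD k 0 + (bullets.countP p : Int) := by
  induction bullets generalizing d with
  | nil => simp
  | cons b bs ih =>
    have hstep := getD_stepA d b k hk
    rw [List.foldl_cons, List.countP_cons, ih (pvStepA d b), hstep, hp b]
    rcases hk with h | h | h | h <;> subst h <;> simp <;> split_ifs <;> simp_all <;> ring

theorem join_cons_ne_empty (s : String) (rest : List String) (h : s ≠ "") :
    PySem.Str.join ", " (s :: rest) ≠ "" := by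
  intro hc
  have hL : (PySem.Str.join ", " (s :: rest)).toList = [] := by rw [hc]; rfl
  rw [PySem.Str.toList_join] at hL
  cases rest with
  | nil => simp_all [PySem.Chars.join_singleton]
  | cons t ts =>
    rw [List.map_cons, List.map_cons, PySem.Chars.join_cons_cons] at hL
    simp_all [List.append_eq_nil_iff]
theorem part_ne_empty (c : Int) (s : String) (h : s ≠ "") :
    (PySem.Int.toStr c ++ s) ≠ "" := by
  intro hc
  have hL : (PySem.Int.toStr c ++ s).toList = [] := by rw [hc]; rfl
  simp [List.append_eq_nil_iff] at hL
  exact h hL.2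
theorem pvBridge (c1 c2 c3 c4 : Int) :
    (let parts : List String := []
     let parts := if c1 ≠ 0 then parts ++ [PySem.Int.toStr c1 ++ " filter changes"] else parts
     let parts := if c2 ≠ 0 then parts ++ [PySem.Int.toStr c2 ++ " calculation changes"] else parts
     let parts := if c3 ≠ 0 then parts ++ [PySem.Int.toStr c3 ++ " worksheet changes"] else parts
     let parts := if c4 ≠ 0 then parts ++ [PySem.Int.toStr c4 ++ " datasource changes"] else parts
     let j := PySem.Str.join ", " parts
     if j = "" then "Configuration updated" else j)
    =
    (let parts := (([((c1 : Int), ("filter" : String)), (c2, "calculation"), (c3, "worksheet"),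
        (c4, "datasource")]).filter (fun p => p.1 ≠ 0)).map
        (fun p => PySem.Int.toStr p.1 ++ " " ++ p.2 ++ " changes")
     if parts = [] then "Configuration updated" else PySem.Str.join ", " parts) := by
  have e1 : ∀ c : Int, PySem.Int.toStr c ++ " " ++ "filter" ++ " changes" = PySem.Int.toStr c ++ " filter changes" := fun c => by
    rw [String.append_assoc, String.append_assoc]; rfl
  have e2 : ∀ c : Int, PySem.Int.toStr c ++ " " ++ "calculation" ++ " changes" = PySem.Int.toStr c ++ " calculation changes" := fun c => by
    rw [String.append_assoc, String.append_assoc]; rfl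
  have e3 : ∀ c : Int, PySem.Int.toStr c ++ " " ++ "worksheet" ++ " changes" = PySem.Int.toStr c ++ " worksheet changes" := fun c => by
    rw [String.append_assoc, String.append_assoc]; rfl
  have e4 : ∀ c : Int, PySem.Int.toStr c ++ " " ++ "datasource" ++ " changes" = PySem.Int.toStr c ++ " datasource changes" := fun c => by
    rw [String.append_assoc, String.append_assoc]; rfl
  have hne : ∀ (c : Int) (s : String) (rest : List String), s ≠ "" →
      (if PySem.Str.join ", " ((PySem.Int.toStr c ++ s) :: rest) = "" then "Configuration updated"
       else PySem.Str.join ", " ((PySem.Int.toStr c ++ s) :: rest))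
      = PySem.Str.join ", " ((PySem.Int.toStr c ++ s) :: rest) := by
    intro c s rest hs
    rw [if_neg (join_cons_ne_empty _ _ (part_ne_empty c s hs))]
  by_cases h1 : c1 = 0 <;> by_cases h2 : c2 = 0 <;> by_cases h3 : c3 = 0 <;> by_cases h4 : c4 = 0 <;>
    simp only [h1, h2, h3, h4, ne_eq, not_true_eq_false, not_false_eq_true, if_true, if_false,
      List.filter, decide_true, decide_false, List.map,
      List.nil_append, List.cons_append, e1, e2, e3, e4] <;>
    first
      | decide
      | (simp; done)
      | (simp
         intro hj
         exact absurd hj (join_cons_ne_empty _ _ (part_ne_empty _ _ (by decide))))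

theorem fold_count (bullets : List String) (k : String) (p : String → Bool)
    (hk : k = "filter" ∨ k = "calculation" ∨ k = "worksheet" ∨ k = "datasource")
    (hp : ∀ b, p b = (if k = "filter" then PySem.Str.isIn "filter" (PySem.Str.lower b)
       else if k = "calculation" then PySem.Str.isIn "calculation" (PySem.Str.lower b) || PySem.Str.isIn "lod" (PySem.Str.lower b)
       else if k = "worksheet" then PySem.Str.isIn "worksheet" (PySem.Str.lower b)
       else PySem.Str.isIn "datasource" (PySem.Str.lower b))) :
    (bullets.foldl pvStepA
      (PySem.Dict.ofList [("filter", 0), ("calculation", 0), ("worksheet", 0), ("datasource", 0)])).getD k 0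
      = (bullets.countP p : Int) := by
  rw [foldA_getD bullets _ k p hk hp]
  rcases hk with h | h | h | h <;> subst h <;> norm_num <;> decide

-- ===== VERDICT (by name: the statement is the Claim_ definition above) =====
theorem visual_summary_line_spec : Claim_equal_visual_summary_line := by
  intro bullets _
  show visual_summary_line bullets = visual_summary_line_alt bullets
  simp only [visual_summary_line, visual_summary_line_alt]
  rw [fold_count bullets "filter" (fun b => PySem.Str.isIn "filter" (PySem.Str.lower b)) (by tauto) (by intro b; simp),
      fold_count bullets "calculation" (fun b => PySem.Str.isIn "calculation" (PySem.Str.lower b) || PySem.Str.isIn "lod" (PySem.Str.lower b)) (by tauto) (by intro b; simp),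
      fold_count bullets "worksheet" (fun b => PySem.Str.isIn "worksheet" (PySem.Str.lower b)) (by tauto) (by intro b; simp),
      fold_count bullets "datasource" (fun b => PySem.Str.isIn "datasource" (PySem.Str.lower b)) (by tauto) (by intro b; simp)]
  simp only [List.countP_map, Function.comp_def]
  exact pvBridge _ _ _ _
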